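-- pv_equiv track=rewrite | github.com/SaeedShadkam/UltimateEdgar-SEC-Parser | src/classes2.py | Find_DuplicatedItems_index
-- ===== SOURCE A (Python) =====
-- def Find_DuplicatedItems_index(Var):
--   oc_set = set()
--   res = []
--   for idx, val in enumerate(Var):
--       if val not in oc_set:
--           oc_set.add(val)
--       else:
--           res.append(idx)
--   return  res
-- ===== SOURCE B (Python) =====
-- def Find_DuplicatedItems_index(Var):
--     positions = {}
--     for idx, val in enumerate(Var):
--         positions.setdefault(val, []).append(idx)
--     res = []
--     for ps in positions.values():
--         res.extend(ps[1:])
--     return sorted(res)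
-- ===== Notes on version B (the rewrite author's own statement) =====
-- stated objective: alternative
-- what changed: Replaces the incremental seen-set scan with a value-to-indices table built in one pass, then flattens every occurrence list past its first element and sorts the collected indices.
import Mathlib
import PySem

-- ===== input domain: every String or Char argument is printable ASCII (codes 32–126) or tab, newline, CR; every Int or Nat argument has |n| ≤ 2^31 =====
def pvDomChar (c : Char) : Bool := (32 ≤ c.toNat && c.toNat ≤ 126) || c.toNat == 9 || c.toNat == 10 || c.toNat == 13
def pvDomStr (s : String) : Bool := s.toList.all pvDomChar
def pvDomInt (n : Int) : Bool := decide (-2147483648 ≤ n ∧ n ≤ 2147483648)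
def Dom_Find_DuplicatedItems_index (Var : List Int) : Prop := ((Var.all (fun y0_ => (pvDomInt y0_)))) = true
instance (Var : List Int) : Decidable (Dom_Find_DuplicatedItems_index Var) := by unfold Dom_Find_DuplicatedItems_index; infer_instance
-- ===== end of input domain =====

-- B replaces A's incremental seen-set scan by a value→indices table, flattening each
-- occurrence list past its first element and sorting (objective: alternative algorithm).

-- ===== PORT A =====
def Find_DuplicatedItems_index (Var : List Int) : List Int :=
  ((PySem.List.enumerate Var 0).foldl
    (fun st p =>
      if st.1.contains p.2 = false then (PySem.Set.add st.1 p.2, st.2)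
      else (st.1, st.2 ++ [p.1]))
    ((PySem.Set.empty : PySem.Set Int), ([] : List Int))).2

-- ===== PORT B =====
def Find_DuplicatedItems_index_alt (Var : List Int) : List Int :=
  let positions : PySem.Dict Int (List Int) :=
    (PySem.List.enumerate Var 0).foldl
      (fun d p => d.modify p.2 [] (fun l => l ++ [p.1])) PySem.Dict.empty
  let res : List Int :=
    positions.values.foldl (fun acc ps => acc ++ PySem.List.slice ps (some 1) none) []
  PySem.List.sorted res (fun x => x) false

-- ===== PRECONDITION & SPEC =====
def Spec_Find_DuplicatedItems_index (Var : List Int) (out : List Int) : Prop := out = Find_DuplicatedItems_index_alt Var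
instance (Var : List Int) (out : List Int) : Decidable (Spec_Find_DuplicatedItems_index Var out) := by unfold Spec_Find_DuplicatedItems_index; infer_instance

-- ===== CLAIM (what is proved, stated in full; the proofs are below) =====
def Claim_equal_Find_DuplicatedItems_index : Prop := ∀ (Var : List Int), Dom_Find_DuplicatedItems_index Var → Spec_Find_DuplicatedItems_index Var (Find_DuplicatedItems_index Var)

-- ===== LEMMAS AND PROOFS =====

-- A's loop, as a structural recursion over the input with an explicit seen-list and index.
def dupGo (seen : List Int) (i : Int) : List Int → List Int
  | [] => []
  | x :: xs => if x ∈ seen then i :: dupGo seen (i + 1) xs else dupGo (seen ++ [x]) (i + 1) xs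

-- indices (enumerate positions) at which v occurs in Var
def occ (Var : List Int) (v : Int) : List Int :=
  ((PySem.List.enumerate Var 0).filter (fun p => p.2 == v)).map (·.1)

-- B's collected (unsorted) duplicate indices
def flatS (Var : List Int) : List Int :=
  (PySem.Set.ofList Var).flatMap (fun v => (occ Var v).tail)

lemma A_go (xs : List Int) : ∀ (seen : PySem.Set Int) (res : List Int) (i : Int),
    ((PySem.List.enumerate xs i).foldl
      (fun st p =>
        if st.1.contains p.2 = false then (PySem.Set.add st.1 p.2, st.2)
        else (st.1, st.2 ++ [p.1]))
      (seen, res)).2 = res ++ dupGo seen i xs := by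
  induction xs with
  | nil => intro seen res i; simp [PySem.List.enumerate_nil, dupGo]
  | cons x xs ih =>
    intro seen res i
    rw [PySem.List.enumerate_cons, List.foldl_cons]
    by_cases hx : x ∈ seen
    · rw [if_neg (by simp [hx]), ih]
      simp [dupGo, hx]
    · rw [if_pos (by simp [hx])]
      have hadd : PySem.Set.add seen x = seen ++ [x] := by simp [PySem.Set.add, hx]
      rw [hadd, ih]
      simp [dupGo, hx]

lemma A_eq (Var : List Int) : Find_DuplicatedItems_index Var = dupGo [] 0 Var := by
  unfold Find_DuplicatedItems_index
  rw [A_go Var PySem.Set.empty [] 0]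
  rfl

lemma dupGo_concat (xs : List Int) : ∀ (seen : List Int) (i : Int) (x : Int),
    dupGo seen i (xs ++ [x]) =
      dupGo seen i xs ++ (if x ∈ seen ∨ x ∈ xs then [i + (xs.length : Int)] else []) := by
  induction xs with
  | nil =>
    intro seen i x
    by_cases hx : x ∈ seen <;> simp [dupGo, hx]
  | cons y xs ih =>
    intro seen i x
    by_cases hy : y ∈ seen
    · simp only [List.cons_append, dupGo, hy, if_true, ih]
      have : (x ∈ seen ∨ x ∈ xs) ↔ (x ∈ seen ∨ x ∈ y :: xs) := by
        constructor
        · rintro (h | h) <;> [exact Or.inl h; exact Or.inr (List.mem_cons_of_mem _ h)]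
        · rintro (h | h)
          · exact Or.inl h
          · rcases List.mem_cons.mp h with rfl | h
            · exact Or.inl hy
            · exact Or.inr h
      rw [if_congr this rfl rfl]
      have harith : i + 1 + (xs.length : Int) = i + ((y :: xs).length : Int) := by
        simp; omega
      rw [harith]
    · simp only [List.cons_append, dupGo, hy, if_false, ih]
      have : (x ∈ seen ++ [y] ∨ x ∈ xs) ↔ (x ∈ seen ∨ x ∈ y :: xs) := by
        simp [List.mem_append, List.mem_cons]; tauto
      rw [if_congr this rfl rfl]
      have harith : i + 1 + (xs.length : Int) = i + ((y :: xs).length : Int) := by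
        simp; omega
      rw [harith]

lemma dupGo_sorted (Var : List Int) :
    (dupGo [] 0 Var).Pairwise (· < ·) ∧ ∀ j ∈ dupGo [] 0 Var, j < (Var.length : Int) := by
  induction Var using List.reverseRecOn with
  | nil => simp [dupGo]
  | append_singleton V x ih =>
    rw [dupGo_concat]
    by_cases hx : x ∈ ([] : List Int) ∨ x ∈ V
    · simp only [hx, if_true]
      constructor
      · refine List.pairwise_append.mpr ⟨ih.1, List.pairwise_singleton _ _, ?_⟩
        intro a ha b hb
        rcases List.mem_singleton.mp hb with rfl
        simpa using ih.2 a ha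
      · intro j hj
        rcases List.mem_append.mp hj with h | h
        · have := ih.2 j h; simp; omega
        · rcases List.mem_singleton.mp h with rfl; simp
    · simp only [hx, if_false, List.append_nil]
      refine ⟨ih.1, fun j hj => ?_⟩
      have := ih.2 j hj; simp; omega

lemma occ_concat (V : List Int) (x v : Int) :
    occ (V ++ [x]) v = occ V v ++ (if x = v then [(V.length : Int)] else []) := by
  unfold occ
  rw [PySem.List.enumerate_append, PySem.List.enumerate_cons, PySem.List.enumerate_nil,
    List.filter_append, List.map_append]
  by_cases hxv : x = v <;> simp [hxv]

lemma occ_nil_iff (V : List Int) (v : Int) : occ V v = [] ↔ v ∉ V := by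
  unfold occ
  rw [List.map_eq_nil_iff, List.filter_eq_nil_iff]
  constructor
  · intro h hv
    rcases List.mem_iff_getElem.mp hv with ⟨k, hk, hkv⟩
    have hmem : ((k : Int), V[k]) ∈ PySem.List.enumerate V 0 := by
      rw [PySem.List.mem_enumerate_iff]
      exact ⟨k, hk, by simp⟩
    have hcontra := h _ hmem
    simp at hcontra
    exact hcontra hkv
  · intro hv p hp
    rcases (PySem.List.mem_enumerate_iff _ _ _).mp hp with ⟨k, hk, rfl⟩
    simp only [beq_iff_eq]
    intro h
    exact hv (h ▸ List.getElem_mem hk)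

-- one value's occurrence list gains the new index, the others are unchanged ⇒ perm + [n]
lemma flatMap_update_perm (x n : Int) (f f' : Int → List Int) :
    ∀ (s : List Int), s.Nodup → x ∈ s → (∀ v ∈ s, v ≠ x → f' v = f v) → f' x = f x ++ [n] →
    (s.flatMap f').Perm (s.flatMap f ++ [n]) := by
  intro s
  induction s with
  | nil => simp
  | cons y t ih =>
    intro hnd hx hne hfx
    rcases List.mem_cons.mp hx with rfl | hxt
    · have hxt : x ∉ t := (List.nodup_cons.mp hnd).1
      have ht : t.flatMap f' = t.flatMap f :=
        List.flatMap_congr (fun v hv =>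
          hne v (List.mem_cons_of_mem _ hv) (fun h => hxt (h ▸ hv)))
      rw [List.flatMap_cons, List.flatMap_cons, hfx, ht, List.append_assoc, List.append_assoc]
      exact List.Perm.append_left (f x) List.perm_append_comm
    · have hy : f' y = f y := hne y List.mem_cons_self (fun h => by
        subst h; exact (List.nodup_cons.mp hnd).1 hxt)
      rw [List.flatMap_cons, List.flatMap_cons, hy, List.append_assoc]
      exact List.Perm.append_left (f y) (ih (List.nodup_cons.mp hnd).2 hxt
        (fun v hv => hne v (List.mem_cons_of_mem _ hv)) hfx)

lemma ofList_concat (V : List Int) (x : Int) :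
    PySem.Set.ofList (V ++ [x]) =
      if x ∈ PySem.Set.ofList V then PySem.Set.ofList V else PySem.Set.ofList V ++ [x] := by
  rw [PySem.Set.ofList_eq_foldl, List.foldl_append, ← PySem.Set.ofList_eq_foldl]
  by_cases hx : x ∈ PySem.Set.ofList V <;> simp [PySem.Set.add, hx]

lemma tail_append_ne_nil {l m : List Int} (h : l ≠ []) : (l ++ m).tail = l.tail ++ m := by
  cases l with
  | nil => exact absurd rfl h
  | cons a t => simp

lemma main_perm (Var : List Int) : (flatS Var).Perm (dupGo [] 0 Var) := by
  induction Var using List.reverseRecOn with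
  | nil => simp [flatS, dupGo, PySem.Set.ofList]
  | append_singleton V x ih =>
    by_cases hx : x ∈ V
    · have hset : PySem.Set.ofList (V ++ [x]) = PySem.Set.ofList V := by
        rw [ofList_concat]
        simp [PySem.Set.mem_ofList, hx]
      have hocc_x : occ V x ≠ [] := fun h => ((occ_nil_iff V x).mp h) hx
      have hdup : dupGo [] 0 (V ++ [x]) = dupGo [] 0 V ++ [(V.length : Int)] := by
        rw [dupGo_concat]
        simp [hx]
      have hperm : (flatS (V ++ [x])).Perm (flatS V ++ [(V.length : Int)]) := by
        unfold flatS
        rw [hset]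
        apply flatMap_update_perm x (V.length : Int)
        · exact PySem.Set.nodup_ofList V
        · exact (PySem.Set.mem_ofList V x).mpr hx
        · intro v hv hvx
          rw [occ_concat, if_neg (fun h => hvx h.symm), List.append_nil]
        · rw [occ_concat, if_pos rfl]
          exact tail_append_ne_nil hocc_x
      rw [hdup]
      exact hperm.trans (ih.append_right _)
    · have hocc0 : occ V x = [] := (occ_nil_iff V x).mpr hx
      have hset : PySem.Set.ofList (V ++ [x]) = PySem.Set.ofList V ++ [x] := by
        rw [ofList_concat]
        simp [PySem.Set.mem_ofList, hx]
      have hflat : flatS (V ++ [x]) = flatS V := by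
        unfold flatS
        rw [hset, List.flatMap_append]
        have h1 : (PySem.Set.ofList V).flatMap (fun v => (occ (V ++ [x]) v).tail) =
            (PySem.Set.ofList V).flatMap (fun v => (occ V v).tail) := by
          apply List.flatMap_congr
          intro v hv
          have hvx : x ≠ v := fun h => hx (h ▸ (PySem.Set.mem_ofList V v).mp hv)
          rw [occ_concat]
          simp [hvx]
        have h2 : ([x].flatMap fun v => (occ (V ++ [x]) v).tail) = [] := by
          simp only [List.flatMap_cons, List.flatMap_nil, List.append_nil]
          rw [occ_concat]
          simp [hocc0]
        rw [h1, h2, List.append_nil]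
      have hdup : dupGo [] 0 (V ++ [x]) = dupGo [] 0 V := by
        rw [dupGo_concat]
        simp [hx]
      rw [hflat, hdup]
      exact ih

lemma B_eq (Var : List Int) :
    Find_DuplicatedItems_index_alt Var = PySem.List.sorted (flatS Var) (fun x => x) false := by
  unfold Find_DuplicatedItems_index_alt
  set D := (PySem.List.enumerate Var 0).foldl
      (fun d p => d.modify p.2 [] (fun l => l ++ [p.1])) (PySem.Dict.empty : PySem.Dict Int (List Int)) with hDdef
  have hnodup : D.keys.Nodup := by
    rw [hDdef]
    exact PySem.Dict.nodup_keys_foldl_modify_key (PySem.List.enumerate Var 0)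
      (fun p : Int × Int => p.2) []
      (fun (_ : PySem.Dict Int (List Int)) (p : Int × Int) => fun l => l ++ [p.1])
      PySem.Dict.empty PySem.Dict.nodup_keys_empty
  have hkeys : D.keys = PySem.Set.ofList Var := by
    rw [hDdef, PySem.Dict.keys_foldl_modify_key, PySem.List.map_snd_enumerate]
    simp [PySem.Set.update, PySem.Dict.keys_empty, ← PySem.Set.ofList_eq_foldl]
  have hget : ∀ v, D.getD v [] = occ Var v := by
    intro v
    rw [hDdef, show (PySem.List.enumerate Var 0).foldl
        (fun d p => d.modify p.2 [] (fun l => l ++ [p.1]))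
        (PySem.Dict.empty : PySem.Dict Int (List Int)) =
      ((PySem.List.enumerate Var 0).map Prod.swap).foldl
        (fun d q => d.modify q.1 [] (fun l => l ++ [q.2]))
        (PySem.Dict.empty : PySem.Dict Int (List Int)) from by rw [List.foldl_map]; rfl]
    rw [PySem.Dict.getD_foldl_modify_append]
    rw [List.filter_map, List.map_map]
    simp [occ, Function.comp_def, Prod.swap]
  have hvalues : D.values = (PySem.Set.ofList Var).map (fun v => occ Var v) := by
    rw [PySem.Dict.values_eq_map_keys D hnodup [], hkeys]
    exact List.map_congr_left (fun v _ => hget v)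
  have hres : D.values.foldl (fun acc ps => acc ++ PySem.List.slice ps (some 1) none) [] =
      flatS Var := by
    have h1 : D.values.foldl (fun acc ps => acc ++ PySem.List.slice ps (some 1) none) [] =
        D.values.foldl (fun acc ps => acc ++ ps.tail) [] := by
      apply PySem.List.foldl_congr_mem
      intro acc ps _
      rw [PySem.List.slice_from_one]
    rw [h1, PySem.List.foldl_append_eq_flatMap, hvalues, List.flatMap_map]
    simp [flatS]
  show PySem.List.sorted
      (D.values.foldl (fun acc ps => acc ++ PySem.List.slice ps (some 1) none) [])
      (fun x => x) false = PySem.List.sorted (flatS Var) (fun x => x) false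
  rw [hres]

-- ===== VERDICT (by name: the statement is the Claim_ definition above) =====
theorem Find_DuplicatedItems_index_spec : Claim_equal_Find_DuplicatedItems_index := by
  intro Var _
  unfold Spec_Find_DuplicatedItems_index
  rw [A_eq, B_eq]
  exact (PySem.List.sorted_eq_of_perm_of_pairwise_lt (flatS Var) (dupGo [] 0 Var)
    (fun x => x) (main_perm Var).symm ((dupGo_sorted Var).1)).symm
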